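-- pv_equiv track=rewrite | github.com/mogottsch/mcr-py | src/package/structs/build.py | create_stops_by_route_ordered
-- ===== SOURCE A (Python) =====
-- StopTimesByTrip = dict[str, list[dict[str, str]]]
--
-- TripIdsByRouteSortedByDeparture = dict[str, list[str]]
--
-- StopsByRouteOrdered = dict[str, list[str]]
--
-- def create_stops_by_route_ordered(
--     trip_ids_by_route: TripIdsByRouteSortedByDeparture,
--     stop_times_by_trip: StopTimesByTrip,
-- ) -> StopsByRouteOrdered:
--     stops_by_route: StopsByRouteOrdered = {}
--     for route_id, trip_ids in trip_ids_by_route.items():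
--         stops_ordered: list[str] = []
--         # we only need the ordered stops, but use the set to check for duplicates
--         stops = set()
--         for trip_id in trip_ids:
--             trip_stop_times = stop_times_by_trip[trip_id]
--
--             for stop_time in trip_stop_times:
--                 stop = stop_time["stop_id"]
--                 if stop not in stops:
--                     stops_ordered.append(stop)
--                     stops.add(stop)
--
--         stops_by_route[route_id] = stops_ordered
--
--     return stops_by_route
-- ===== SOURCE B (Python) =====
-- def create_stops_by_route_ordered(
--     trip_ids_by_route,
--     stop_times_by_trip,
-- ):
--     stops_by_route = {}
--     for route_id, trip_ids in trip_ids_by_route.items():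
--         stream = [
--             stop_time["stop_id"]
--             for trip_id in trip_ids
--             for stop_time in stop_times_by_trip[trip_id]
--         ]
--         first = {}
--         for i in range(len(stream) - 1, -1, -1):
--             first[stream[i]] = i
--         stops_by_route[route_id] = sorted(first, key=first.__getitem__)
--     return stops_by_route
-- ===== Notes on version B (the rewrite author's own statement) =====
-- stated objective: alternative
-- what changed: Per route, instead of A's single pass that checks a maintained seen-set and appends, B collects the route's full stop_id stream, builds a first-occurrence index map by overwriting entries in a reverse sweep over the indices, and returns the distinct stops sorted by that first-occurrence index.
import Mathlib
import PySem

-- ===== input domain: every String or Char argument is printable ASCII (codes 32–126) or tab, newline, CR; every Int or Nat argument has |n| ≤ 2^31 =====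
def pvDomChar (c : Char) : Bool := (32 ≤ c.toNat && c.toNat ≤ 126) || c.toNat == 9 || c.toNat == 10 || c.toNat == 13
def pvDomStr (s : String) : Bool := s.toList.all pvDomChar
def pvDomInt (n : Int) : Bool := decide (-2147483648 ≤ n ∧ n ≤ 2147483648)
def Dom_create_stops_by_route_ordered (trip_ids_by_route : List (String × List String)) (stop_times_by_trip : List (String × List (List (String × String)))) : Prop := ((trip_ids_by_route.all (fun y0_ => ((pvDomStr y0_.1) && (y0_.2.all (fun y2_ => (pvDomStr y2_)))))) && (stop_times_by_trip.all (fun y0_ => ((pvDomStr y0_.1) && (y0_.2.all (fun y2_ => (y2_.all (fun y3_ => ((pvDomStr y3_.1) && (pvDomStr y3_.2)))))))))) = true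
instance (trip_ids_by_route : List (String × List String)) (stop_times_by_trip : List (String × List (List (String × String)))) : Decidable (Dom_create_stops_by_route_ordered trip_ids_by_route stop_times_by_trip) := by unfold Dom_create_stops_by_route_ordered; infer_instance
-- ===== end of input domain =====

-- B replaces A's one-pass seen-set check-and-append with a different per-route algorithm:
-- collect the stream, index first occurrences by a reverse overwrite sweep, sort stops by that index.
-- ===== PORT A =====
-- A: dict comprehension via explicit fold over items; per route a check-and-append loop
-- maintaining stops_ordered and a duplicate set.  stop_times_by_trip[trip_id] and
-- stop_time["stop_id"] are KeyError lookups; their success is required by Pre_ below,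
-- so the total getD form is used (the default is never reached inside Pre_).
def create_stops_by_route_ordered (trip_ids_by_route : List (String × List String)) (stop_times_by_trip : List (String × List (List (String × String)))) : List (String × List String) :=
  (trip_ids_by_route.foldl
    (fun (stops_by_route : PySem.Dict String (List String)) rp =>
      let acc := rp.2.foldl
        (fun (acc : List String × PySem.Set String) trip_id =>
          let trip_stop_times := (PySem.Dict.mk stop_times_by_trip).getD trip_id []
          trip_stop_times.foldl
            (fun acc stop_time =>
              let stop := (PySem.Dict.mk stop_time).getD "stop_id" ""
              if PySem.Set.contains acc.2 stop then acc
              else (acc.1 ++ [stop], PySem.Set.add acc.2 stop))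
            acc)
        ([], PySem.Set.empty)
      stops_by_route.insert rp.1 acc.1)
    (PySem.Dict.mk [])).items

-- ===== PORT B =====
-- B: per route, collect the full stop_id stream of its trips (double comprehension → flatMap/map),
-- build the first-occurrence index dict by overwriting in a sweep over range(len-1, -1, -1),
-- then sorted(first, key=first.__getitem__) — sorting the dict's keys by stored index.
-- first.__getitem__ is ported as getD _ 0: it is only applied to keys of first, so the default is never reached.
def create_stops_by_route_ordered_alt (trip_ids_by_route : List (String × List String)) (stop_times_by_trip : List (String × List (List (String × String)))) : List (String × List String) :=
  (trip_ids_by_route.foldl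
    (fun (d : PySem.Dict String (List String)) rp =>
      let stream := rp.2.flatMap (fun trip_id =>
        ((PySem.Dict.mk stop_times_by_trip).getD trip_id []).map
          (fun stop_time => (PySem.Dict.mk stop_time).getD "stop_id" ""))
      let first := (PySem.List.pyRange (PySem.List.len stream - 1) (-1) (-1)).foldl
        (fun (f : PySem.Dict String Int) i => f.insert (PySem.List.pyGetD stream i "") i)
        PySem.Dict.empty
      d.insert rp.1 (PySem.List.sorted first.keys (fun k => first.getD k 0) false))
    (PySem.Dict.mk [])).items

-- ===== PRECONDITION & SPEC =====
-- Pre_ excludes exactly the inputs on which the Python A raises KeyError: a trip_id of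
-- some route missing from stop_times_by_trip, or a stop_time record without a "stop_id" key.
def Pre_create_stops_by_route_ordered (trip_ids_by_route : List (String × List String)) (stop_times_by_trip : List (String × List (List (String × String)))) : Prop :=
  ∀ rp ∈ trip_ids_by_route, ∀ t ∈ rp.2,
    (PySem.Dict.mk stop_times_by_trip).contains t = true ∧
    ∀ st ∈ (PySem.Dict.mk stop_times_by_trip).getD t [],
      (PySem.Dict.mk st).contains "stop_id" = true
instance (trip_ids_by_route : List (String × List String)) (stop_times_by_trip : List (String × List (List (String × String)))) : Decidable (Pre_create_stops_by_route_ordered trip_ids_by_route stop_times_by_trip) := by unfold Pre_create_stops_by_route_ordered; infer_instance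

def pvWitness_create_stops_by_route_ordered : (List (String × List String)) × (List (String × List (List (String × String)))) :=
  ([("r1", ["t1", "t2"]), ("r2", ["t2"])],
   [("t1", [[("stop_id", "A"), ("dep", "07:00")], [("stop_id", "B")]]),
    ("t2", [[("stop_id", "B")], [("stop_id", "C")]])])

def Spec_create_stops_by_route_ordered (trip_ids_by_route : List (String × List String)) (stop_times_by_trip : List (String × List (List (String × String)))) (out : List (String × List String)) : Prop := out = create_stops_by_route_ordered_alt trip_ids_by_route stop_times_by_trip
instance (trip_ids_by_route : List (String × List String)) (stop_times_by_trip : List (String × List (List (String × String)))) (out : List (String × List String)) : Decidable (Spec_create_stops_by_route_ordered trip_ids_by_route stop_times_by_trip out) := by unfold Spec_create_stops_by_route_ordered; infer_instance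

-- ===== CLAIM (what is proved, stated in full; the proofs are below) =====
def Claim_equal_create_stops_by_route_ordered : Prop := ∀ (trip_ids_by_route : List (String × List String)) (stop_times_by_trip : List (String × List (List (String × String)))), Dom_create_stops_by_route_ordered trip_ids_by_route stop_times_by_trip → Pre_create_stops_by_route_ordered trip_ids_by_route stop_times_by_trip → Spec_create_stops_by_route_ordered trip_ids_by_route stop_times_by_trip (create_stops_by_route_ordered trip_ids_by_route stop_times_by_trip)

-- ===== LEMMAS AND PROOFS =====
theorem pvWitness_ok :
    Dom_create_stops_by_route_ordered pvWitness_create_stops_by_route_ordered.1 pvWitness_create_stops_by_route_ordered.2 ∧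
    Pre_create_stops_by_route_ordered pvWitness_create_stops_by_route_ordered.1 pvWitness_create_stops_by_route_ordered.2 := by
  constructor <;> decide

-- A's inner loop over one trip's stop_times, started from a pair whose list and set coincide,
-- keeps them equal and is Set.update by the list of extracted stop ids.
theorem innerA_one (key : List (String × String) → String)
    (L : List (List (String × String))) (s : PySem.Set String) :
    List.foldl
      (fun (acc : List String × PySem.Set String) stop_time =>
        if PySem.Set.contains acc.2 (key stop_time) then acc
        else (acc.1 ++ [key stop_time], PySem.Set.add acc.2 (key stop_time)))
      (s, s) L
    = (PySem.Set.update s (L.map key), PySem.Set.update s (L.map key)) := by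
  induction L generalizing s with
  | nil => simp [PySem.Set.update]
  | cons a L ih =>
    simp only [List.foldl_cons, List.map_cons, PySem.Set.update_cons]
    by_cases h : key a ∈ s
    · rw [if_pos ((PySem.Set.contains_iff s (key a)).mpr h), PySem.Set.add_of_mem h]
      exact ih s
    · rw [if_neg (by simp [h]), PySem.Set.add_of_not_mem h]
      exact ih (s ++ [key a])

-- A's loop over a route's trips is Set.update by the concatenated stream of stop ids.
theorem innerA (g : String → List (List (String × String)))
    (key : List (String × String) → String)
    (T : List String) (s : PySem.Set String) :
    List.foldl
      (fun (acc : List String × PySem.Set String) trip_id =>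
        List.foldl
          (fun (acc : List String × PySem.Set String) stop_time =>
            if PySem.Set.contains acc.2 (key stop_time) then acc
            else (acc.1 ++ [key stop_time], PySem.Set.add acc.2 (key stop_time)))
          acc (g trip_id))
      (s, s) T
    = (PySem.Set.update s (T.flatMap (fun t => (g t).map key)),
       PySem.Set.update s (T.flatMap (fun t => (g t).map key))) := by
  induction T generalizing s with
  | nil => simp [PySem.Set.update]
  | cons t T ih =>
    simp only [List.foldl_cons, List.flatMap_cons]
    rw [innerA_one key (g t) s, ih, PySem.Set.update_append]

-- B's reverse index sweep, read back-to-front: a right fold of inserts; getD is the FIRST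
-- index in the list whose extracted stop equals the key.
theorem getD_foldr_insert (g : Nat → String) (l : List Nat) (d : PySem.Dict String Int)
    (s : String) (dflt : Int) :
    (l.foldr (fun (k : Nat) (f : PySem.Dict String Int) => f.insert (g k) ((k : Int))) d).getD s dflt
      = match l.find? (fun k => g k == s) with
        | some k => (k : Int)
        | none => d.getD s dflt := by
  induction l with
  | nil => rfl
  | cons k l ih =>
    simp only [List.foldr_cons, List.find?_cons]
    rw [PySem.Dict.getD_insert]
    by_cases h : s = g k
    · simp [h]
    · have hb : (g k == s) = false := by
        simp
        exact fun e => h e.symm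
      rw [if_neg h, hb, ih]

-- range(0, len cs) as a list of Int casts
theorem pyRange_len_cast (cs : List String) :
    PySem.List.pyRange 0 (PySem.List.len cs) 1 = (List.range cs.length).map (fun (k : Nat) => (k : Int)) := by
  rw [PySem.List.pyRange_one, PySem.List.len_eq]
  simp

-- range(len-1, -1, -1) is the reverse of that
theorem pyRange_down_eq_reverse (cs : List String) :
    PySem.List.pyRange (PySem.List.len cs - 1) (-1) (-1)
      = ((List.range cs.length).map (fun (k : Nat) => (k : Int))).reverse := by
  rw [show PySem.List.pyRange (PySem.List.len cs - 1) (-1) (-1)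
        = (PySem.List.pyRange 0 (PySem.List.len cs) 1).reverse from by
      rw [PySem.List.pyRange_neg_one_eq_reverse]; norm_num]
  rw [pyRange_len_cast]

-- membership in Set.ofList
theorem mem_ofList_iff' (cs : List String) (a : String) :
    a ∈ PySem.Set.ofList cs ↔ a ∈ cs := by
  simp [pysem]

-- the first index over range(len cs) whose element equals s is idxOf s cs
theorem find?_range_getD (cs : List String) (s : String) (h : s ∈ cs) :
    (List.range cs.length).find? (fun (k : Nat) => PySem.List.pyGetD cs ((k : Nat) : Int) "" == s)
      = some (cs.idxOf s) := by
  induction cs with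
  | nil => cases h
  | cons c cs ih =>
    rw [List.length_cons, List.range_succ_eq_map, List.find?_cons]
    by_cases hc : c = s
    · simp [hc]
    · have hp : (PySem.List.pyGetD (c :: cs) ((0 : Nat) : Int) "" == s) = false := by
        simp
        exact hc
      rw [hp, List.find?_map]
      have hs : s ∈ cs := by
        cases h with
        | head => exact absurd rfl hc
        | tail _ h => exact h
      have hfun : ((fun k => PySem.List.pyGetD (c :: cs) ((k : Nat) : Int) "" == s) ∘ Nat.succ)
          = (fun k => PySem.List.pyGetD cs ((k : Nat) : Int) "" == s) := by
        funext k
        simp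
      rw [hfun, ih hs]
      simp [List.idxOf_cons_ne _ hc]

-- normalising B's foldl over range(len-1, -1, -1) into a right fold over range(len)
theorem dict_norm (cs : List String) :
    (PySem.List.pyRange (PySem.List.len cs - 1) (-1) (-1)).foldl
        (fun (f : PySem.Dict String Int) i => f.insert (PySem.List.pyGetD cs i "") i)
        PySem.Dict.empty
      = (List.range cs.length).foldr
          (fun (k : Nat) (f : PySem.Dict String Int) =>
            f.insert (PySem.List.pyGetD cs ((k : Nat) : Int) "") ((k : Nat) : Int)) PySem.Dict.empty := by
  rw [pyRange_down_eq_reverse, ← List.map_reverse, List.foldl_map, List.foldl_reverse]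

-- the keys of B's index dict are the distinct stops, in reversed-stream order
theorem keys_first_dict (cs : List String) :
    ((PySem.List.pyRange (PySem.List.len cs - 1) (-1) (-1)).foldl
        (fun (f : PySem.Dict String Int) i => f.insert (PySem.List.pyGetD cs i "") i)
        PySem.Dict.empty).keys
      = PySem.Set.ofList cs.reverse := by
  rw [PySem.Dict.keys_foldl_insert_key (key := fun i => PySem.List.pyGetD cs i "")
        (f := fun _ i => i)]
  rw [pyRange_down_eq_reverse, ← List.map_reverse, List.map_map]
  have h : (List.range cs.length).map
      ((fun i => PySem.List.pyGetD cs i "") ∘ fun (k : Nat) => (k : Int)) = cs := by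
    apply List.ext_getElem
    · simp
    · intro i h1 h2
      simp [List.getD_eq_getElem?_getD, List.getElem?_eq_getElem h2]
  rw [List.map_reverse, h]
  rfl

-- getD of B's index dict at a stop of the stream is its first-occurrence index
theorem getD_first_dict (cs : List String) (s : String) (h : s ∈ cs) :
    ((PySem.List.pyRange (PySem.List.len cs - 1) (-1) (-1)).foldl
        (fun (f : PySem.Dict String Int) i => f.insert (PySem.List.pyGetD cs i "") i)
        PySem.Dict.empty).getD s 0
      = (cs.idxOf s : Int) := by
  rw [dict_norm, getD_foldr_insert, find?_range_getD cs s h]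

-- idxOf of (l ++ [x]) at a fresh x
theorem idxOf_append_singleton_self' (l : List String) (x : String) (h : x ∉ l) :
    (l ++ [x]).idxOf x = l.length := by
  rw [List.idxOf_append_of_notMem h]
  simp

-- the distinct elements of cs, in first-occurrence order, have strictly increasing idxOf
theorem pairwise_idxOf_ofList (cs : List String) :
    (PySem.Set.ofList cs).Pairwise (fun a b => ((cs.idxOf a : Int) < (cs.idxOf b : Int))) := by
  induction cs using List.reverseRecOn with
  | nil => simp [PySem.Set.ofList]
  | append_singleton l x ih =>
    have hof : PySem.Set.ofList (l ++ [x]) = PySem.Set.add (PySem.Set.ofList l) x := by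
      simp [PySem.Set.ofList_eq_foldl, List.foldl_append]
    rw [hof]
    have base : (PySem.Set.ofList l).Pairwise
        (fun a b => (((l ++ [x]).idxOf a : Int) < ((l ++ [x]).idxOf b : Int))) := by
      refine List.Pairwise.imp_of_mem ?_ ih
      intro a b ha hb hr
      have ha' : a ∈ l := (mem_ofList_iff' l a).mp ha
      have hb' : b ∈ l := (mem_ofList_iff' l b).mp hb
      rwa [List.idxOf_append_of_mem ha', List.idxOf_append_of_mem hb']
    by_cases hx : x ∈ l
    · rwa [PySem.Set.add_of_mem ((mem_ofList_iff' l x).mpr hx)]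
    · rw [PySem.Set.add_of_not_mem (fun hm => hx ((mem_ofList_iff' l x).mp hm))]
      rw [List.pairwise_append]
      refine ⟨base, List.pairwise_singleton _ _, ?_⟩
      intro a ha b hb
      have ha' : a ∈ l := (mem_ofList_iff' l a).mp ha
      rw [List.mem_singleton] at hb
      subst hb
      rw [List.idxOf_append_of_mem ha', idxOf_append_singleton_self' l b hx]
      exact_mod_cast List.idxOf_lt_length_of_mem ha'

-- B's per-route value: sorting the index dict's keys by stored index is exactly
-- the distinct stops in first-occurrence order.
theorem route_sorted (cs : List String) :
    PySem.List.sorted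
        ((PySem.List.pyRange (PySem.List.len cs - 1) (-1) (-1)).foldl
            (fun (f : PySem.Dict String Int) i => f.insert (PySem.List.pyGetD cs i "") i)
            PySem.Dict.empty).keys
        (fun k =>
          ((PySem.List.pyRange (PySem.List.len cs - 1) (-1) (-1)).foldl
              (fun (f : PySem.Dict String Int) i => f.insert (PySem.List.pyGetD cs i "") i)
              PySem.Dict.empty).getD k 0)
        false
      = PySem.Set.ofList cs := by
  apply PySem.List.sorted_eq_of_perm_of_pairwise_lt
  · rw [keys_first_dict]
    refine (List.perm_ext_iff_of_nodup (PySem.Set.nodup_ofList _) (PySem.Set.nodup_ofList _)).mpr ?_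
    intro a
    rw [mem_ofList_iff', mem_ofList_iff', List.mem_reverse]
  · refine List.Pairwise.imp_of_mem ?_ (pairwise_idxOf_ofList cs)
    intro a b ha hb hr
    have ha' : a ∈ cs := (mem_ofList_iff' cs a).mp ha
    have hb' : b ∈ cs := (mem_ofList_iff' cs b).mp hb
    rwa [getD_first_dict cs a ha', getD_first_dict cs b hb']

-- ===== VERDICT (by name: the statement is the Claim_ definition above) =====
theorem create_stops_by_route_ordered_spec : Claim_equal_create_stops_by_route_ordered := by
  intro tibr sbt _ _
  unfold Spec_create_stops_by_route_ordered create_stops_by_route_ordered create_stops_by_route_ordered_alt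
  congr 2
  funext d rp
  show d.insert rp.1
      ((List.foldl
        (fun (acc : List String × PySem.Set String) trip_id =>
          List.foldl
            (fun (acc : List String × PySem.Set String) stop_time =>
              if PySem.Set.contains acc.2 ((PySem.Dict.mk stop_time).getD "stop_id" "") then acc
              else (acc.1 ++ [(PySem.Dict.mk stop_time).getD "stop_id" ""],
                    PySem.Set.add acc.2 ((PySem.Dict.mk stop_time).getD "stop_id" "")))
            acc ((PySem.Dict.mk sbt).getD trip_id []))
        ((PySem.Set.empty : PySem.Set String), (PySem.Set.empty : PySem.Set String)) rp.2).1)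
    = d.insert rp.1
        (PySem.List.sorted
          ((PySem.List.pyRange
              (PySem.List.len (rp.2.flatMap (fun trip_id =>
                ((PySem.Dict.mk sbt).getD trip_id []).map
                  (fun stop_time => (PySem.Dict.mk stop_time).getD "stop_id" ""))) - 1) (-1) (-1)).foldl
            (fun (f : PySem.Dict String Int) i =>
              f.insert (PySem.List.pyGetD (rp.2.flatMap (fun trip_id =>
                ((PySem.Dict.mk sbt).getD trip_id []).map
                  (fun stop_time => (PySem.Dict.mk stop_time).getD "stop_id" ""))) i "") i)
            PySem.Dict.empty).keys
          (fun k =>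
            ((PySem.List.pyRange
                (PySem.List.len (rp.2.flatMap (fun trip_id =>
                  ((PySem.Dict.mk sbt).getD trip_id []).map
                    (fun stop_time => (PySem.Dict.mk stop_time).getD "stop_id" ""))) - 1) (-1) (-1)).foldl
              (fun (f : PySem.Dict String Int) i =>
                f.insert (PySem.List.pyGetD (rp.2.flatMap (fun trip_id =>
                  ((PySem.Dict.mk sbt).getD trip_id []).map
                    (fun stop_time => (PySem.Dict.mk stop_time).getD "stop_id" ""))) i "") i)
              PySem.Dict.empty).getD k 0)
          false)
  rw [innerA (fun t => (PySem.Dict.mk sbt).getD t [])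
        (fun st => (PySem.Dict.mk st).getD "stop_id" "") rp.2 PySem.Set.empty]
  rw [route_sorted]
  rfl
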